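-- pv_equiv track=rewrite | github.com/francohilt/lexer_parser | lexer.py | automata_puntoYComa
-- ===== SOURCE A (Python) =====
-- RESULTADO_TRAMPA = "TRAMPA"
--
-- RESULTADO_ACEPTADO = "RESULTADO_ACEPTADO"
--
-- RESULTADO_NO_ACEPTADO = "RESULTADO_NO_ACEPTADO"
--
-- ESTADO_TRAMPA = -1
--
-- def automata_puntoYComa (cadena):
--     estado = 0
--     final = 1
--
--     for caracter in cadena:
--         if estado == 0 and caracter == ';':
--             estado = 1
--         else:
--             estado = ESTADO_TRAMPA
--             break
--
--     if estado == ESTADO_TRAMPA: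
--         return RESULTADO_TRAMPA
--     elif estado == final:
--         return RESULTADO_ACEPTADO
--     else:
--         return RESULTADO_NO_ACEPTADO
-- ===== SOURCE B (Python) =====
-- RESULTADO_TRAMPA = "TRAMPA"
-- RESULTADO_ACEPTADO = "RESULTADO_ACEPTADO"
-- RESULTADO_NO_ACEPTADO = "RESULTADO_NO_ACEPTADO"
--
-- def automata_puntoYComa(cadena):
--     if cadena == ';':
--         return RESULTADO_ACEPTADO
--     if cadena == '':
--         return RESULTADO_NO_ACEPTADO
--     return RESULTADO_TRAMPA
-- ===== Notes on version B (the rewrite author's own statement) =====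
-- stated objective: simpler
-- what changed: Replaces the state-machine loop with a direct closed-form classification: accept exactly ';', not-accept the empty string, trap everything else.
import Mathlib
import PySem

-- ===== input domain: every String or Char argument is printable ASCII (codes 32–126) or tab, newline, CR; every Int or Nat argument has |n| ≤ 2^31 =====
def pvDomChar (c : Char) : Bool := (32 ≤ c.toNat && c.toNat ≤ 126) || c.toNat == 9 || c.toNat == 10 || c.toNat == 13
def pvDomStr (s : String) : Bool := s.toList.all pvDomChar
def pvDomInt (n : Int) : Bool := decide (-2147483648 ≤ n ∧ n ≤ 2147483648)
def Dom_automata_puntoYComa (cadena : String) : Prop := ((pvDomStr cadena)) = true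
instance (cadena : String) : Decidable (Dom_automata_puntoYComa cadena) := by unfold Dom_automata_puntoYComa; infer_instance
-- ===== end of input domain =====

-- ===== PORT A =====
-- A's loop with break, transliterated as recursion on the character list.
def pvLoopA : Int → List Char → Int
  | estado, [] => estado
  | estado, c :: rest =>
    if estado = 0 ∧ c = ';' then pvLoopA 1 rest
    else (-1 : Int)  -- estado = ESTADO_TRAMPA; break

def automata_puntoYComa (cadena : String) : String :=
  let estado := pvLoopA 0 cadena.toList
  if estado = -1 then "TRAMPA"
  else if estado = 1 then "RESULTADO_ACEPTADO"
  else "RESULTADO_NO_ACEPTADO"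

-- ===== PORT B =====
-- B: closed-form classification, no automaton.
def automata_puntoYComa_alt (cadena : String) : String :=
  if cadena = ";" then "RESULTADO_ACEPTADO"
  else if cadena = "" then "RESULTADO_NO_ACEPTADO"
  else "TRAMPA"

-- ===== PRECONDITION & SPEC =====
def Spec_automata_puntoYComa (cadena : String) (out : String) : Prop := out = automata_puntoYComa_alt cadena
instance (cadena : String) (out : String) : Decidable (Spec_automata_puntoYComa cadena out) := by unfold Spec_automata_puntoYComa; infer_instance

-- ===== CLAIM (what is proved, stated in full; the proofs are below) =====
def Claim_equal_automata_puntoYComa : Prop := ∀ (cadena : String), Dom_automata_puntoYComa cadena → Spec_automata_puntoYComa cadena (automata_puntoYComa cadena)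

-- ===== LEMMAS AND PROOFS =====

-- ===== VERDICT (by name: the statement is the Claim_ definition above) =====
theorem pvLoopA_char : ∀ (l : List Char), pvLoopA 0 l = if l = [] then 0 else if l = [';'] then 1 else -1 := by
  intro l
  match l with
  | [] => simp [pvLoopA]
  | [c] =>
    by_cases hc : c = ';' <;> simp [pvLoopA, hc]
  | c :: d :: rest =>
    by_cases hc : c = ';'
    · by_cases hd : d = ';' <;> simp [pvLoopA, hc, hd]
    · simp [pvLoopA, hc]

theorem automata_puntoYComa_spec : Claim_equal_automata_puntoYComa := by
  intro cadena _
  unfold Spec_automata_puntoYComa automata_puntoYComa automata_puntoYComa_alt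
  rw [pvLoopA_char]
  have h1 : (cadena = ";") ↔ cadena.toList = [';'] := by
    constructor
    · rintro rfl; rfl
    · intro h; exact String.toList_inj.mp (by simp [h])
  have h0 : (cadena = "") ↔ cadena.toList = ([] : List Char) := by
    constructor
    · rintro rfl; rfl
    · intro h; exact String.toList_inj.mp (by simp [h])
  by_cases hs : cadena.toList = [';']
  · simp [h1.mpr hs]
  · by_cases he : cadena.toList = ([] : List Char)
    · simp [h0.mpr he]
    · simp [hs, he, (h1.not.mpr hs : ¬ cadena = ";"), (h0.not.mpr he : ¬ cadena = "")]
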